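-- pv_equiv track=rewrite | github.com/PizzaYolodu74/OCR | matrix_cutting.py | thresholding
-- ===== SOURCE A (Python) =====
-- def thresholding(H, s, l):
--     # Allow to choose where we need to cut in function of the threshold
--     n = 0
--     L = []
--     for i in range(len(H)):
--         if H[i] == l:
--             n += 1
--         else:
--             if n > s:
--                 L.append(i - n // 2)
--             n = 0
--     return L
-- ===== SOURCE B (Python) =====
-- def thresholding(H, s, l):
--     # Run-length encode H, then emit the midpoint of every run of value l
--     # longer than s; a run that reaches the end of H is never cut.
--     groups = []
--     i = 0
--     while i < len(H):
--         j = i + 1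
--         while j < len(H) and H[j] == H[i]:
--             j += 1
--         groups.append((H[i], j - i))
--         i = j
--     out = []
--     pos = 0
--     for value, length in groups[:-1]:
--         pos += length
--         if value == l and length > s:
--             out.append(pos - length // 2)
--     return out
-- ===== Notes on version B (the rewrite author's own statement) =====
-- stated objective: alternative
-- what changed: B first run-length encodes H into (value, length) groups and then emits midpoints from every group but the last, replacing A's single streaming index loop with a counter and flush-on-change.
-- outside the precondition, e.g. on thresholding([2], -1, 5): A returns [0], B returns []; on thresholding([1, 1], -2, 5): A returns [0, 1], B returns []
import Mathlib
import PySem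

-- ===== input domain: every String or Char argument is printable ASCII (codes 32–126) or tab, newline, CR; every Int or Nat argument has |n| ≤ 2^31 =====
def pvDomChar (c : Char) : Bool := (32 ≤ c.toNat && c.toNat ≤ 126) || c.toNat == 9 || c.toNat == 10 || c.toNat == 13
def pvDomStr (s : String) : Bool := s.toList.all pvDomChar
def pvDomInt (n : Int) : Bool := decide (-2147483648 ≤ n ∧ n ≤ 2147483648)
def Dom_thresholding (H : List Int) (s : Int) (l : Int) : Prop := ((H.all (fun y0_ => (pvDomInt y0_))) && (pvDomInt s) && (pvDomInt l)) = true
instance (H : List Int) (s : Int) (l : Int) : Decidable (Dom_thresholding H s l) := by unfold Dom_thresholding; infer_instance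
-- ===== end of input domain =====

-- B replaces A's streaming counter loop by run-length encoding H into (value, length)
-- groups and emitting midpoints from every group but the last (alternative decomposition,
-- same cost); equivalence is proved on the natural domain 0 ≤ s.


-- ===== PORT A =====
-- n = 0; L = []; for i in range(len(H)): if H[i] == l: n += 1 else: …; return L
def thresholding (H : List Int) (s : Int) (l : Int) : List Int :=
  ((PySem.List.pyRange 0 (PySem.List.len H) 1).foldl
    (fun (st : Int × List Int) i =>
      if PySem.List.pyGetD H i 0 = l then (st.1 + 1, st.2)
      else if st.1 > s then (0, st.2 ++ [i - PySem.Int.floordiv st.1 2])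
      else (0, st.2))
    (0, [])).2

-- ===== PORT B =====
-- inner 'while j < len(H) and H[j] == H[i]: j += 1'  (hx is H[i])
def pvRunEnd (H : List Int) (hx : Int) (j : Nat) : Nat :=
  if _h : j < H.length ∧ PySem.List.pyGetD H (j : Int) 0 = hx then pvRunEnd H hx (j + 1)
  else j
termination_by H.length - j
decreasing_by omega

-- cited by pvGroupsFrom's decreasing_by
theorem pvRunEnd_ge (H : List Int) (hx : Int) (j : Nat) : j ≤ pvRunEnd H hx j := by
  fun_induction pvRunEnd <;> omega

-- outer 'while i < len(H): j = i + 1; …; groups.append((H[i], j - i)); i = j'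
def pvGroupsFrom (H : List Int) (i : Nat) : List (Int × Int) :=
  if _h : i < H.length then
    let j := pvRunEnd H (PySem.List.pyGetD H (i : Int) 0) (i + 1)
    (PySem.List.pyGetD H (i : Int) 0, (j : Int) - (i : Int)) :: pvGroupsFrom H j
  else []
termination_by H.length - i
decreasing_by
  have := pvRunEnd_ge H (PySem.List.pyGetD H (i : Int) 0) (i + 1)
  omega

-- groups = pvGroupsFrom H 0; pos = 0
-- for value, length in groups[:-1]: pos += length; if value == l and length > s: out.append(pos - length // 2)
def thresholding_alt (H : List Int) (s : Int) (l : Int) : List Int :=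
  ((PySem.List.slice (pvGroupsFrom H 0) none (some (-1))).foldl
    (fun (st : Int × List Int) g =>
      let pos := st.1 + g.2
      if g.1 = l ∧ g.2 > s then (pos, st.2 ++ [pos - PySem.Int.floordiv g.2 2])
      else (pos, st.2))
    (0, [])).2

-- ===== PRECONDITION & SPEC =====
-- Pre_ restricts to the natural domain of a run-length threshold, 0 ≤ s: for a negative
-- threshold A appends a cut at every index holding a non-l value (its freshly reset
-- counter 0 already exceeds s), an artefact of the counter loop that B's run-based
-- algorithm does not reproduce.
def Pre_thresholding (H : List Int) (s : Int) (l : Int) : Prop := 0 ≤ s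
instance (H : List Int) (s : Int) (l : Int) : Decidable (Pre_thresholding H s l) := by unfold Pre_thresholding; infer_instance

def pvWitness_thresholding : List Int × Int × Int := ([1, 1, 1, 2], 2, 1)

def Spec_thresholding (H : List Int) (s : Int) (l : Int) (out : List Int) : Prop := out = thresholding_alt H s l
instance (H : List Int) (s : Int) (l : Int) (out : List Int) : Decidable (Spec_thresholding H s l out) := by unfold Spec_thresholding; infer_instance

-- ===== CLAIM (what is proved, stated in full; the proofs are below) =====
def Claim_equal_thresholding : Prop := ∀ (H : List Int) (s : Int) (l : Int), Dom_thresholding H s l → Pre_thresholding H s l → Spec_thresholding H s l (thresholding H s l)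

-- ===== LEMMAS AND PROOFS =====

-- A-side reference: the cuts A's loop still emits from position p with run counter n
def pvAux (s l : Int) : List Int → Int → Int → List Int
  | [], _, _ => []
  | x :: t, p, n =>
    if x = l then pvAux s l t (p + 1) (n + 1)
    else (if n > s then [p - PySem.Int.floordiv n 2] else []) ++ pvAux s l t (p + 1) 0

-- B-side reference: the cuts B's loop emits on groups gs starting at position pos
def pvAuxB (s l : Int) : List (Int × Int) → Int → List Int
  | [], _ => []
  | g :: t, pos =>
    (if g.1 = l ∧ g.2 > s then [pos + g.2 - PySem.Int.floordiv g.2 2] else []) ++ pvAuxB s l t (pos + g.2)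

-- structural run-length encoding, the bridge between pvGroupsFrom and list recursion
def pvRLE : List Int → List (Int × Int)
  | [] => []
  | x :: t =>
    (x, ((t.takeWhile (fun y => y == x)).length : Int) + 1) :: pvRLE (t.dropWhile (fun y => y == x))
termination_by H => H.length
decreasing_by
  simpa using Nat.lt_succ_of_le (List.length_dropWhile_le _ _)

theorem pvA_fold (s l : Int) : ∀ (H : List Int) (p n : Int) (L : List Int),
    ((PySem.List.enumerate H p).foldl
      (fun (st : Int × List Int) (ix : Int × Int) =>
        if ix.2 = l then (st.1 + 1, st.2)
        else if st.1 > s then (0, st.2 ++ [ix.1 - PySem.Int.floordiv st.1 2])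
        else (0, st.2)) (n, L)).2 = L ++ pvAux s l H p n := by
  intro H
  induction H with
  | nil => intro p n L; simp [pvAux, PySem.List.enumerate]
  | cons x t ih =>
    intro p n L
    rw [PySem.List.enumerate_cons]
    simp only [List.foldl_cons, pvAux]
    by_cases hx : x = l
    · have h2 := ih (p + 1) (n + 1) L
      simp only [hx] at h2 ⊢
      exact h2
    · by_cases hn : n > s
      · have h2 := ih (p + 1) 0 (L ++ [p - PySem.Int.floordiv n 2])
        simp only [hx, hn, if_true, if_false] at h2 ⊢
        rw [h2, List.append_assoc, List.singleton_append]
      · have h2 := ih (p + 1) 0 L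
        simp only [hx, hn, if_false] at h2 ⊢
        exact h2

theorem pvA_eq (H : List Int) (s l : Int) : thresholding H s l = pvAux s l H 0 0 := by
  unfold thresholding
  have h2 := pvA_fold s l H 0 0 []
  rw [PySem.List.enumerate_eq_map_pyRange H 0, List.foldl_map] at h2
  simpa using h2

theorem pvB_fold (s l : Int) : ∀ (gs : List (Int × Int)) (pos : Int) (L : List Int),
    (gs.foldl
      (fun (st : Int × List Int) g =>
        let pos := st.1 + g.2
        if g.1 = l ∧ g.2 > s then (pos, st.2 ++ [pos - PySem.Int.floordiv g.2 2])
        else (pos, st.2)) (pos, L)).2 = L ++ pvAuxB s l gs pos := by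
  intro gs
  induction gs with
  | nil => intro pos L; simp [pvAuxB]
  | cons g gt ih =>
    intro pos L
    simp only [List.foldl_cons, pvAuxB]
    by_cases hg : g.1 = l ∧ g.2 > s
    · have h2 := ih (pos + g.2) (L ++ [pos + g.2 - PySem.Int.floordiv g.2 2])
      simp only [if_pos hg] at h2 ⊢
      rw [h2, List.append_assoc, List.singleton_append]
    · have h2 := ih (pos + g.2) L
      simp only [if_neg hg] at h2 ⊢
      rw [h2, List.nil_append]

theorem pvDropWhile_eq_drop (p : Int → Bool) (l : List Int) :
    l.dropWhile p = l.drop (l.takeWhile p).length := by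
  induction l with
  | nil => simp
  | cons a t ih =>
    rw [List.takeWhile_cons, List.dropWhile_cons]
    by_cases hp : p a = true
    · simp [hp, ih]
    · simp [hp]

theorem pvRunEnd_spec (H : List Int) (x : Int) (j : Nat) :
    pvRunEnd H x j = j + ((H.drop j).takeWhile (fun y => y == x)).length := by
  fun_induction pvRunEnd with
  | case1 j h ih =>
    obtain ⟨hj, hv⟩ := h
    rw [PySem.List.pyGetD_natCast] at hv
    have hgd : H.getD j 0 = H[j] := List.getD_eq_getElem H 0 hj
    rw [List.drop_eq_getElem_cons hj, List.takeWhile_cons]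
    have : (H[j] == x) = true := by rw [← hgd, hv]; exact beq_self_eq_true x
    rw [this]
    simp only [if_true, List.length_cons, ih]
    omega
  | case2 j h =>
    by_cases hj : j < H.length
    · have hv : ¬ PySem.List.pyGetD H (j : Int) 0 = x := by tauto
      rw [PySem.List.pyGetD_natCast, List.getD_eq_getElem H 0 hj] at hv
      rw [List.drop_eq_getElem_cons hj, List.takeWhile_cons]
      simp [hv]
    · rw [List.drop_eq_nil_of_le (by omega)]
      simp

theorem pvGroupsFrom_spec (H : List Int) (i : Nat) :
    pvGroupsFrom H i = pvRLE (H.drop i) := by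
  fun_induction pvGroupsFrom with
  | case1 i hi j ih =>
    have hgd : PySem.List.pyGetD H (i : Int) 0 = H[i] := by
      rw [PySem.List.pyGetD_natCast]; exact List.getD_eq_getElem H 0 hi
    have hj : j = (i + 1) + ((H.drop (i + 1)).takeWhile (fun y => y == H[i])).length := by
      rw [show j = pvRunEnd H (PySem.List.pyGetD H (i : Int) 0) (i + 1) from rfl,
        pvRunEnd_spec, hgd]
    rw [List.drop_eq_getElem_cons hi, pvRLE, ih, hj, pvDropWhile_eq_drop, List.drop_drop, hgd]
    congr 2
    push_cast; omega
  | case2 i hi =>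
    rw [List.drop_eq_nil_of_le (by omega), pvRLE]

theorem pvB_eq (H : List Int) (s l : Int) :
    thresholding_alt H s l = pvAuxB s l (pvRLE H).dropLast 0 := by
  unfold thresholding_alt
  rw [pvGroupsFrom_spec H 0, List.drop_zero, PySem.List.slice_to_neg_one, pvB_fold]
  rw [List.nil_append]

theorem pvAux_run_l (s l : Int) : ∀ (r rest : List Int), (∀ y ∈ r, y = l) → ∀ (p n : Int),
    pvAux s l (r ++ rest) p n = pvAux s l rest (p + r.length) (n + r.length) := by
  intro r
  induction r with
  | nil => intro rest _ p n; simp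
  | cons y t ih =>
    intro rest h p n
    have hy : y = l := h y (by simp)
    simp only [List.cons_append, pvAux, if_pos hy]
    rw [ih rest (fun z hz => h z (by simp [hz])) (p + 1) (n + 1)]
    congr 1 <;> (push_cast [List.length_cons]; ring)

theorem pvAux_run_nonl (s l : Int) (hs : 0 ≤ s) : ∀ (r rest : List Int), (∀ y ∈ r, y ≠ l) → ∀ (p : Int),
    pvAux s l (r ++ rest) p 0 = pvAux s l rest (p + r.length) 0 := by
  intro r
  induction r with
  | nil => intro rest _ p; simp
  | cons y t ih =>
    intro rest h p
    have hy : y ≠ l := h y (by simp)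
    simp only [List.cons_append, pvAux, if_neg hy]
    rw [if_neg (by omega), ih rest (fun z hz => h z (by simp [hz])) (p + 1)]
    simp only [List.nil_append]
    congr 1
    push_cast [List.length_cons]; ring

theorem pvAux_head_run_l (s l x : Int) (t : List Int) (hx : x = l) (p : Int) :
    pvAux s l (x :: t) p 0
      = pvAux s l (t.dropWhile (fun y => y == x))
          (p + (((t.takeWhile (fun y => y == x)).length : Int) + 1))
          (((t.takeWhile (fun y => y == x)).length : Int) + 1) := by
  have hall : ∀ y ∈ x :: t.takeWhile (fun y => y == x), y = l := by
    intro y hy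
    rcases List.mem_cons.mp hy with h1 | h1
    · rw [h1, hx]
    · have := List.mem_takeWhile_imp h1
      rw [show y = x by simpa using this, hx]
  conv_lhs => rw [show x :: t = (x :: t.takeWhile (fun y => y == x)) ++ t.dropWhile (fun y => y == x) by
    rw [List.cons_append, List.takeWhile_append_dropWhile]]
  rw [pvAux_run_l s l _ _ hall p 0]
  congr 1 <;> (push_cast [List.length_cons]; ring)

theorem pvAux_head_run_nonl (s l x : Int) (t : List Int) (hs : 0 ≤ s) (hx : x ≠ l) (p : Int) :
    pvAux s l (x :: t) p 0
      = pvAux s l (t.dropWhile (fun y => y == x))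
          (p + (((t.takeWhile (fun y => y == x)).length : Int) + 1)) 0 := by
  have hall : ∀ y ∈ x :: t.takeWhile (fun y => y == x), y ≠ l := by
    intro y hy
    rcases List.mem_cons.mp hy with h1 | h1
    · rw [h1]; exact hx
    · have := List.mem_takeWhile_imp h1
      rw [show y = x by simpa using this]; exact hx
  conv_lhs => rw [show x :: t = (x :: t.takeWhile (fun y => y == x)) ++ t.dropWhile (fun y => y == x) by
    rw [List.cons_append, List.takeWhile_append_dropWhile]]
  rw [pvAux_run_nonl s l hs _ _ hall p]
  congr 1

theorem pvMain (s l : Int) (hs : 0 ≤ s) : ∀ (N : Nat) (H : List Int), H.length ≤ N → ∀ (p : Int),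
    pvAux s l H p 0 = pvAuxB s l (pvRLE H).dropLast p := by
  intro N
  induction N with
  | zero =>
    intro H hH p
    have : H = [] := List.eq_nil_of_length_eq_zero (by omega)
    subst this
    simp [pvAux, pvRLE, pvAuxB]
  | succ N ih =>
    intro H hH p
    match H with
    | [] => simp [pvAux, pvRLE, pvAuxB]
    | x :: t =>
      have hrest_len : (t.dropWhile (fun y => y == x)).length ≤ N := by
        have := List.length_dropWhile_le (fun y => y == x) t
        simp at hH; omega
      rw [pvRLE]
      by_cases hx : x = l
      · rw [pvAux_head_run_l s l x t hx p]
        cases hrc : t.dropWhile (fun y => y == x) with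
        | nil => simp [pvAux, pvRLE, pvAuxB]
        | cons y t' =>
          have hy : y ≠ x := by
            have := List.head?_dropWhile_not (fun y => y == x) t
            rw [hrc] at this
            simpa using this
          have hyl : y ≠ l := by rw [← hx]; exact hy
          rw [pvRLE, List.dropLast_cons_of_ne_nil (by rw [pvRLE.eq_def]; cases t' <;> simp)]
          rw [pvAuxB]
          have ihrest := ih (y :: t') (by rw [← hrc]; exact hrest_len)
            (p + (((t.takeWhile (fun y => y == x)).length : Int) + 1))
          rw [pvRLE] at ihrest
          simp only [pvAux, if_neg hyl, if_neg (show ¬ (0:Int) > s by omega),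
            List.nil_append] at ihrest ⊢
          rw [ihrest]
          simp [hx]
      · rw [pvAux_head_run_nonl s l x t hs hx p]
        cases hrc : t.dropWhile (fun y => y == x) with
        | nil => simp [pvAux, pvRLE, pvAuxB]
        | cons y t' =>
          rw [pvRLE, List.dropLast_cons_of_ne_nil (by rw [pvRLE.eq_def]; cases t' <;> simp),
            pvAuxB]
          have ihrest := ih (y :: t') (by rw [← hrc]; exact hrest_len)
            (p + (((t.takeWhile (fun y => y == x)).length : Int) + 1))
          rw [pvRLE] at ihrest
          rw [ihrest]
          simp [hx]

-- ===== VERDICT (by name: the statement is the Claim_ definition above) =====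
theorem thresholding_spec : Claim_equal_thresholding := by
  intro H s l _ hpre
  unfold Spec_thresholding
  rw [pvA_eq, pvB_eq, pvMain s l hpre H.length H le_rfl 0]
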